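-- pv_equiv track=rewrite | github.com/TTMichaelA/aoc_2025 | day3.py | digit_check
-- ===== SOURCE A (Python) =====
-- def digit_check(num_str):
--     for i in range(9,0,-1):
--         ind1 = num_str[:len(num_str)-1].find(str(i))
--         if ind1 >= 0:
--             for i in range(9,0,-1):
--                 ind2 = num_str[ind1+1:len(num_str)].find(str(i))
--                 if ind2 >= 0:
--                     num_str2 = num_str[ind1+1:len(num_str)]
--                     return int(num_str[ind1]) * 10 + int(num_str2[ind2])
-- ===== SOURCE B (Python) =====
-- def digit_check(num_str):
--     # One right-to-left pass: track the max digit 1-9 seen so far (to the right)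
--     # and the best two-digit value formed by a digit followed by a later digit.
--     best = None
--     max_right = None
--     for c in reversed(num_str):
--         if '1' <= c <= '9':
--             if max_right is not None:
--                 v = int(c) * 10 + int(max_right)
--                 if best is None or v > best:
--                     best = v
--             if max_right is None or c > max_right:
--                 max_right = c
--     return best
-- ===== Notes on version B (the rewrite author's own statement) =====
-- stated objective: alternative
-- what changed: A's 9-down-to-1 outer/inner loops of repeated substring .find scans over slices are replaced by a single right-to-left pass that tracks the maximum digit 1-9 seen so far and the best value digit*10+later-digit.
import Mathlib
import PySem

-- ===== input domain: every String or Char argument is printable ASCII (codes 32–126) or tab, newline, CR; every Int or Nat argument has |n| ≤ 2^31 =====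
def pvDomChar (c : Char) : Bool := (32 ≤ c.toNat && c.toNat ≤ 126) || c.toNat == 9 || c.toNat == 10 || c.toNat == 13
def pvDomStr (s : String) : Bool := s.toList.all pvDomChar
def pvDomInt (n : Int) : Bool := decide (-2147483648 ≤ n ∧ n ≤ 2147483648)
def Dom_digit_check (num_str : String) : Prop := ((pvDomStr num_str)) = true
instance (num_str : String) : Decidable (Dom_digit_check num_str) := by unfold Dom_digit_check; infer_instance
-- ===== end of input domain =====

-- B replaces A's 9×9 nested countdown of substring .find scans by one right-to-left pass
-- tracking the max digit seen so far and the best pair value (objective: alternative).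

-- ===== PORT A =====
-- inner 'for i in range(9,0,-1)' of A (ind1 is the enclosing loop's found index)
def dcA_inner (cs : List Char) (ind1 : Int) : List Int → Option Int
  | [] => none
  | i :: rest =>
    let num_str2 := PySem.List.slice cs (some (ind1 + 1)) (some (cs.length : Int))
    let ind2 := PySem.Chars.find num_str2 (PySem.Int.toChars i)
    if 0 ≤ ind2 then
      -- return int(num_str[ind1]) * 10 + int(num_str2[ind2]); both chars are found
      -- digit chars, so int() cannot raise (match-failure branches are unreachable)
      match PySem.List.pyGet? cs ind1, PySem.List.pyGet? num_str2 ind2 with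
      | some c1, some c2 =>
        (match PySem.Int.ofChars? [c1], PySem.Int.ofChars? [c2] with
         | some a, some b => some (a * 10 + b)
         | _, _ => none)
      | _, _ => none
    else dcA_inner cs ind1 rest

-- outer 'for i in range(9,0,-1)' of A; falling off the inner loop continues the outer one
def dcA_outer (cs : List Char) : List Int → Option Int
  | [] => none
  | i :: rest =>
    let ind1 := PySem.Chars.find (PySem.List.slice cs none (some ((cs.length : Int) - 1))) (PySem.Int.toChars i)
    if 0 ≤ ind1 then
      match dcA_inner cs ind1 (PySem.List.pyRange 9 0 (-1)) with
      | some v => some v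
      | none => dcA_outer cs rest
    else dcA_outer cs rest

def digit_check (num_str : String) : Option Int :=
  dcA_outer num_str.toList (PySem.List.pyRange 9 0 (-1))

-- ===== PORT B =====
-- one step of Source B's loop body; int(c) on a char guarded to '1'..'9' is ported
-- exactly as its code point minus 48
def dcB_step (st : Option Int × Option Char) (c : Char) : Option Int × Option Char :=
  if '1' ≤ c ∧ c ≤ '9' then
    let best :=
      match st.2 with
      | none => st.1
      | some m =>
        let v : Int := ((c.toNat : Int) - 48) * 10 + ((m.toNat : Int) - 48)
        match st.1 with
        | none => some v
        | some b => if v > b then some v else some b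
    let mr :=
      match st.2 with
      | none => some c
      | some m => if c > m then some c else some m
    (best, mr)
  else st

def digit_check_alt (num_str : String) : Option Int :=
  (num_str.toList.reverse.foldl dcB_step (none, none)).1

-- ===== PRECONDITION & SPEC =====
def Spec_digit_check (num_str : String) (out : Option Int) : Prop := out = digit_check_alt num_str
instance (num_str : String) (out : Option Int) : Decidable (Spec_digit_check num_str out) := by unfold Spec_digit_check; infer_instance

-- ===== CLAIM (what is proved, stated in full; the proofs are below) =====
def Claim_equal_digit_check : Prop := ∀ (num_str : String), Dom_digit_check num_str → Spec_digit_check num_str (digit_check num_str)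

-- ===== LEMMAS AND PROOFS =====

-- digit value of a digit char
def dv (c : Char) : Int := (c.toNat : Int) - 48
-- the char for digit d
def dchar (d : Nat) : Char := Char.ofNat (48 + d)
-- [k, k-1, …, 1] (the value of range(k,0,-1))
def desc : Nat → List Int
  | 0 => []
  | k+1 => ((k+1 : Nat) : Int) :: desc k

-- max digit char of value ≤ k occurring in the list (earliest on equal chars; chars of
-- equal code point are equal anyway), none if there is none
def maxDigB (k : Nat) : List Char → Option Char
  | [] => none
  | c :: t =>
    if 49 ≤ c.toNat ∧ c.toNat ≤ 48 + k then
      match maxDigB k t with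
      | none => some c
      | some m => if c > m then some c else some m
    else maxDigB k t

-- best value 10*tens+ones over pairs (tens digit of value ≤ k, any later digit)
def specB (k : Nat) : List Char → Option Int
  | [] => none
  | c :: t =>
    if 49 ≤ c.toNat ∧ c.toNat ≤ 48 + k then
      match maxDigB 9 t with
      | none => specB k t
      | some m =>
        match specB k t with
        | none => some (dv c * 10 + dv m)
        | some b => if dv c * 10 + dv m > b then some (dv c * 10 + dv m) else some b
    else specB k t

theorem char_cond (c : Char) : ('1' ≤ c ∧ c ≤ '9') ↔ (49 ≤ c.toNat ∧ c.toNat ≤ 57) := by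
  simp [Char.le_def, UInt32.le_iff_toNat_le]

theorem dchar_toNat (d : Nat) (h1 : 1 ≤ d) (h2 : d ≤ 9) : (dchar d).toNat = 48 + d := by
  interval_cases d <;> decide

theorem eq_dchar_of_toNat (c : Char) (d : Nat) (h : c.toNat = 48 + d) : c = dchar d := by
  rw [← Char.ofNat_toNat c, h]; rfl

theorem toChars_digit (d : Nat) (h1 : 1 ≤ d) (h2 : d ≤ 9) : PySem.Int.toChars (d : Int) = [dchar d] := by
  interval_cases d <;> decide

theorem ofChars?_dchar (d : Nat) (h1 : 1 ≤ d) (h2 : d ≤ 9) : PySem.Int.ofChars? [dchar d] = some (d : Int) := by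
  interval_cases d <;> decide

theorem dv_dchar (d : Nat) (h1 : 1 ≤ d) (h2 : d ≤ 9) : dv (dchar d) = (d : Int) := by
  unfold dv
  rw [dchar_toNat d h1 h2]
  omega

theorem maxDigB_zero (l : List Char) : maxDigB 0 l = none := by
  induction l with
  | nil => rfl
  | cons c t ih => simp only [maxDigB]; rw [if_neg (by omega), ih]

theorem char_gt_iff (a b : Char) : a > b ↔ b.toNat < a.toNat := by
  simp [GT.gt, Char.lt_def, UInt32.lt_iff_toNat_lt]

theorem char_toNat_inj (a b : Char) (h : a.toNat = b.toNat) : a = b := by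
  rw [← Char.ofNat_toNat a, h, Char.ofNat_toNat]

theorem maxDigB_isDig (k : Nat) (l : List Char) (m : Char) (h : maxDigB k l = some m) :
    (49 ≤ m.toNat ∧ m.toNat ≤ 48 + k) ∧ m ∈ l := by
  induction l generalizing m with
  | nil => simp [maxDigB] at h
  | cons c t ih =>
    simp only [maxDigB] at h
    by_cases hc : 49 ≤ c.toNat ∧ c.toNat ≤ 48 + k
    · rw [if_pos hc] at h
      cases hmt : maxDigB k t with
      | none => rw [hmt] at h; cases h; exact ⟨hc, List.mem_cons_self ..⟩
      | some m' =>
        rw [hmt] at h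
        dsimp only at h
        by_cases hgt : c > m'
        · rw [if_pos hgt] at h; cases h; exact ⟨hc, List.mem_cons_self ..⟩
        · rw [if_neg hgt] at h; cases h
          obtain ⟨h1, h2⟩ := ih _ hmt
          exact ⟨h1, List.mem_cons_of_mem _ h2⟩
    · rw [if_neg hc] at h
      obtain ⟨h1, h2⟩ := ih _ h
      exact ⟨h1, List.mem_cons_of_mem _ h2⟩

theorem maxDigB_le (k : Nat) (l : List Char) (a : Char) (ha : a ∈ l) (h1 : 49 ≤ a.toNat)
    (h2 : a.toNat ≤ 48 + k) : ∃ m, maxDigB k l = some m ∧ a.toNat ≤ m.toNat := by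
  induction l with
  | nil => simp at ha
  | cons c t ih =>
    simp only [maxDigB]
    rcases List.mem_cons.1 ha with rfl | hat
    · rw [if_pos ⟨h1, h2⟩]
      rw [show (match maxDigB k t with
            | none => some a
            | some m => if a > m then some a else some m) =
          (maxDigB k t).elim (some a) (fun m => if a > m then some a else some m) from by
        cases maxDigB k t <;> rfl]
      cases hmt : maxDigB k t with
      | none => exact ⟨a, rfl, le_refl _⟩
      | some m' =>
        dsimp only [Option.elim]
        by_cases hgt : a > m'
        · rw [if_pos hgt]; exact ⟨a, rfl, le_refl _⟩
        · rw [if_neg hgt]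
          exact ⟨m', rfl, by rw [char_gt_iff] at hgt; omega⟩
    · obtain ⟨m', hm', hle⟩ := ih hat
      by_cases hc : 49 ≤ c.toNat ∧ c.toNat ≤ 48 + k
      · rw [if_pos hc, hm']
        try dsimp only
        by_cases hgt : c > m'
        · rw [if_pos hgt]
          exact ⟨c, rfl, by rw [char_gt_iff] at hgt; omega⟩
        · rw [if_neg hgt]; exact ⟨m', rfl, hle⟩
      · rw [if_neg hc]; exact ⟨m', hm', hle⟩

theorem maxDigB_attain (k : Nat) (l : List Char) (a : Char) (ha : a ∈ l) (h1 : 49 ≤ a.toNat)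
    (h2 : a.toNat = 48 + k) : maxDigB k l = some a := by
  obtain ⟨m, hm, hle⟩ := maxDigB_le k l a ha h1 (by omega)
  obtain ⟨⟨_, hub⟩, _⟩ := maxDigB_isDig k l m hm
  rw [hm, char_toNat_inj m a (by omega)]

theorem maxDigB_shrink (k : Nat) (l : List Char) (h : ∀ c ∈ l, c.toNat ≠ 48 + (k+1)) :
    maxDigB (k+1) l = maxDigB k l := by
  induction l with
  | nil => rfl
  | cons c t ih =>
    have hne := h c (List.mem_cons_self ..)
    have ih' := ih (fun x hx => h x (List.mem_cons_of_mem _ hx))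
    simp only [maxDigB]
    rw [ih']
    by_cases hc : 49 ≤ c.toNat ∧ c.toNat ≤ 48 + k
    · rw [if_pos hc, if_pos ⟨hc.1, by omega⟩]
    · rw [if_neg hc, if_neg (by omega)]

theorem maxDigB_none (l : List Char) (h : maxDigB 9 l = none) :
    ∀ c ∈ l, ¬ (49 ≤ c.toNat ∧ c.toNat ≤ 57) := by
  induction l with
  | nil => simp
  | cons c t ih =>
    simp only [maxDigB] at h
    by_cases hc : 49 ≤ c.toNat ∧ c.toNat ≤ 48 + 9
    · rw [if_pos hc] at h
      exfalso
      cases hmt : maxDigB 9 t <;> rw [hmt] at h <;> dsimp only at h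
      · simp at h
      · split at h <;> simp at h
    · rw [if_neg hc] at h
      intro x hx
      rcases List.mem_cons.1 hx with rfl | hxt
      · omega
      · exact ih h x hxt

theorem maxDigB9_none' (l : List Char) (h : ∀ c ∈ l, ¬ (49 ≤ c.toNat ∧ c.toNat ≤ 57)) :
    maxDigB 9 l = none := by
  induction l with
  | nil => rfl
  | cons c t ih =>
    simp only [maxDigB]
    rw [if_neg (by have := h c (List.mem_cons_self ..); omega),
      ih (fun x hx => h x (List.mem_cons_of_mem _ hx))]

theorem specB_none (k : Nat) (l : List Char) (h : ∀ c ∈ l, ¬ (49 ≤ c.toNat ∧ c.toNat ≤ 57)) :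
    specB k l = none := by
  induction l with
  | nil => rfl
  | cons c t ih =>
    have ht := fun x hx => h x (List.mem_cons_of_mem _ hx)
    simp only [specB]
    rw [maxDigB9_none' t ht, ih ht]
    split <;> rfl

theorem specB_bound (d : Nat) (hd : d ≤ 9) (l : List Char) (b : Int) (h : specB d l = some b) :
    ∃ m, maxDigB 9 l = some m ∧ b ≤ 10 * (d : Int) + dv m := by
  induction l generalizing b with
  | nil => simp [specB] at h
  | cons c t ih =>
    simp only [specB] at h
    by_cases hc : 49 ≤ c.toNat ∧ c.toNat ≤ 48 + d
    · rw [if_pos hc] at h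
      cases hmt : maxDigB 9 t with
      | none =>
        rw [hmt] at h; dsimp only at h
        obtain ⟨m', hm', _⟩ := ih _ h
        rw [hm'] at hmt; cases hmt
      | some m' =>
        rw [hmt] at h; dsimp only at h
        have hc9 : 49 ≤ c.toNat ∧ c.toNat ≤ 48 + 9 := ⟨hc.1, by omega⟩
        have hb : b ≤ 10 * (d : Int) + dv m' := by
          cases hst : specB d t with
          | none =>
            rw [hst] at h; dsimp only at h
            cases h
            unfold dv; omega
          | some b' =>
            rw [hst] at h; dsimp only at h
            obtain ⟨m'', hm'', hb'⟩ := ih _ hst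
            rw [hmt] at hm''; cases hm''
            split at h <;> cases h
            · unfold dv; omega
            · exact hb'
        simp only [maxDigB, if_pos hc9, hmt]
        try dsimp only
        by_cases hgt : c > m'
        · rw [if_pos hgt]
          refine ⟨c, rfl, ?_⟩
          rw [char_gt_iff] at hgt
          unfold dv at hb ⊢; omega
        · rw [if_neg hgt]
          exact ⟨m', rfl, hb⟩
    · rw [if_neg hc] at h
      obtain ⟨m', hm', hb⟩ := ih _ h
      simp only [maxDigB]
      by_cases hc9 : 49 ≤ c.toNat ∧ c.toNat ≤ 48 + 9
      · rw [if_pos hc9, hm']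
        try dsimp only
        by_cases hgt : c > m'
        · rw [if_pos hgt]
          refine ⟨c, rfl, ?_⟩
          rw [char_gt_iff] at hgt
          unfold dv at hb ⊢; omega
        · rw [if_neg hgt]; exact ⟨m', rfl, hb⟩
      · rw [if_neg hc9]; exact ⟨m', hm', hb⟩

theorem spec_S1 (d : Nat) (h1 : 1 ≤ d) (h9 : d ≤ 9) (P₁ rest : List Char) (m : Char)
    (hm : maxDigB 9 rest = some m) (hP : dchar d ∉ P₁) :
    specB d (P₁ ++ dchar d :: rest) = some ((d : Int) * 10 + dv m) := by
  have hdc := dchar_toNat d h1 h9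
  obtain ⟨⟨hm1, hm2⟩, _⟩ := maxDigB_isDig 9 rest m hm
  revert hP
  induction P₁ with
  | nil =>
    intro hP
    simp only [List.nil_append, specB, hdc, hm]
    rw [if_pos ⟨by omega, by omega⟩]
    try dsimp only
    cases hst : specB d rest with
    | none =>
      try dsimp only
      have : dv (dchar d) = (d : Int) := dv_dchar d h1 h9
      rw [this]
    | some b =>
      try dsimp only
      obtain ⟨m'', hm'', hb⟩ := specB_bound d h9 rest b hst
      rw [hm] at hm''; cases hm''
      rw [dv_dchar d h1 h9]
      by_cases hgt : (d : Int) * 10 + dv m > b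
      · rw [if_pos hgt]
      · rw [if_neg hgt]
        have : b = (d : Int) * 10 + dv m := by omega
        rw [this]
  | cons c P₁' ih =>
    intro hP
    have hc_ne : c ≠ dchar d := fun he => hP (List.mem_cons.2 (Or.inl he.symm))
    have ih' := ih (fun hx => hP (List.mem_cons_of_mem _ hx))
    simp only [List.cons_append, specB]
    by_cases hc : 49 ≤ c.toNat ∧ c.toNat ≤ 48 + d
    · have hcd : c.toNat ≠ 48 + d := fun he => hc_ne (eq_dchar_of_toNat c d he)
      have hmem : dchar d ∈ P₁' ++ dchar d :: rest := by simp
      obtain ⟨m'', hm'', hle''⟩ := maxDigB_le 9 _ (dchar d) hmem (by omega) (by omega)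
      obtain ⟨⟨hm''1, hm''9⟩, _⟩ := maxDigB_isDig 9 _ m'' hm''
      rw [if_pos hc, hm'', ih']
      try dsimp only
      rw [if_neg (by unfold dv; rw [hdc] at hle''; omega)]
    · rw [if_neg hc]; exact ih'

theorem spec_S2 (d : Nat) (h1 : 1 ≤ d) (h9 : d ≤ 9) (P₁ rest : List Char)
    (hm : maxDigB 9 rest = none) (hP : dchar d ∉ P₁) :
    specB d (P₁ ++ dchar d :: rest) = specB (d-1) (P₁ ++ dchar d :: rest) := by
  have hdc := dchar_toNat d h1 h9
  have hrest := maxDigB_none rest hm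
  revert hP
  induction P₁ with
  | nil =>
    intro _
    simp only [List.nil_append, specB, hdc, hm]
    rw [if_pos ⟨by omega, by omega⟩, if_neg (by omega)]
    try dsimp only
    rw [specB_none d rest hrest, specB_none (d-1) rest hrest]
  | cons c P₁' ih =>
    intro hP
    have hc_ne : c ≠ dchar d := fun he => hP (List.mem_cons.2 (Or.inl he.symm))
    have ih' := ih (fun hx => hP (List.mem_cons_of_mem _ hx))
    have hcd : c.toNat ≠ 48 + d := fun he => hc_ne (eq_dchar_of_toNat c d he)
    simp only [List.cons_append, specB]
    by_cases hc : 49 ≤ c.toNat ∧ c.toNat ≤ 48 + d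
    · rw [if_pos hc, if_pos ⟨hc.1, by omega⟩, ih']
    · rw [if_neg hc, if_neg (by omega)]
      exact ih'

theorem spec_S3 (d : Nat) (h1 : 1 ≤ d) (h9 : d ≤ 9) (l : List Char)
    (h : dchar d ∉ l.dropLast) : specB d l = specB (d-1) l := by
  have hdc := dchar_toNat d h1 h9
  induction l with
  | nil => rfl
  | cons c t ih =>
    by_cases ht : t = []
    · subst ht
      simp only [specB, maxDigB]
      split <;> split <;> rfl
    · rw [List.dropLast_cons_of_ne_nil ht] at h
      have hc_ne : c ≠ dchar d := fun he => h (List.mem_cons.2 (Or.inl he.symm))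
      have ih' := ih (fun hx => h (List.mem_cons_of_mem _ hx))
      have hcd : c.toNat ≠ 48 + d := fun he => hc_ne (eq_dchar_of_toNat c d he)
      simp only [specB]
      by_cases hc : 49 ≤ c.toNat ∧ c.toNat ≤ 48 + d
      · rw [if_pos hc, if_pos ⟨hc.1, by omega⟩, ih']
      · rw [if_neg hc, if_neg (by omega)]
        exact ih'

theorem specB_zero (l : List Char) : specB 0 l = none := by
  induction l with
  | nil => rfl
  | cons c t ih => simp only [specB]; rw [if_neg (by omega), ih]

theorem singleton_infix_mem (a : Char) (l : List Char) : [a] <:+: l ↔ a ∈ l := by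
  constructor
  · intro h; exact List.singleton_sublist.1 h.sublist
  · intro h; obtain ⟨s, t, rfl⟩ := List.append_of_mem h; exact ⟨s, t, by simp⟩

theorem prefix_drop_get (a : Char) (l : List Char) (i : Nat) (h : [a] <+: l.drop i) :
    ∃ (hi : i < l.length), l[i] = a := by
  obtain ⟨t, ht⟩ := h
  have hd : l.drop i = a :: t := ht.symm
  have hlen : i < l.length := by
    have := congrArg List.length hd
    simp at this
    omega
  refine ⟨hlen, ?_⟩
  have h0 : (l.drop i)[0]'(by rw [hd]; simp) = a := by simp [hd]
  rw [List.getElem_drop] at h0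
  simpa using h0

theorem drop_prefix_of_getElem (a : Char) (l : List Char) (i : Nat) (hi : i < l.length)
    (h : l[i] = a) : [a] <+: l.drop i := by
  refine ⟨l.drop (i+1), ?_⟩
  rw [← List.getElem_cons_drop hi, h]
  rfl

theorem pyRange_desc : PySem.List.pyRange 9 0 (-1) = desc 9 := by decide

theorem slice_pref (cs : List Char) :
    PySem.List.slice cs none (some ((cs.length : Int) - 1)) = cs.dropLast := by
  cases cs with
  | nil => decide
  | cons c t =>
    have h : (((c :: t).length : Int) - 1) = (((c :: t).length - 1 : Nat) : Int) := by
      simp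
    rw [h, PySem.List.slice_to_natCast, ← List.dropLast_eq_take]

theorem slice_suff (cs : List Char) (p : Nat) :
    PySem.List.slice cs (some ((p : Int) + 1)) (some (cs.length : Int)) = cs.drop (p+1) := by
  have h1 : ((p : Int) + 1) = ((p+1 : Nat) : Int) := by push_cast; ring
  rw [h1, PySem.List.slice_natCast]
  exact List.take_of_length_le (by simp)

theorem A_inner (cs : List Char) (p : Nat) (c1 : Char) (aval : Int)
    (hc1 : PySem.List.pyGet? cs (p : Int) = some c1)
    (hav : PySem.Int.ofChars? [c1] = some aval) :
    ∀ k, k ≤ 9 → dcA_inner cs (p : Int) (desc k) =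
      (maxDigB k (cs.drop (p+1))).map (fun m => aval * 10 + dv m) := by
  intro k
  induction k with
  | zero => intro _; rw [maxDigB_zero]; rfl
  | succ k ih =>
    intro hk9
    have hd1 : 1 ≤ k + 1 := by omega
    have hdc := dchar_toNat (k+1) hd1 hk9
    simp only [desc, dcA_inner, slice_suff cs p, toChars_digit (k+1) hd1 hk9]
    by_cases hfind : 0 ≤ PySem.Chars.find (cs.drop (p+1)) [dchar (k+1)]
    · obtain ⟨hpre, hmin⟩ := PySem.Chars.find_spec hfind
      obtain ⟨hflen, hfget⟩ := prefix_drop_get _ _ _ hpre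
      rw [if_pos hfind]
      have hget2 : PySem.List.pyGet? (cs.drop (p+1)) (PySem.Chars.find (cs.drop (p+1)) [dchar (k+1)]) = some (dchar (k+1)) := by
        rw [PySem.List.pyGet?_of_nonneg _ hfind, List.getElem?_eq_getElem hflen, hfget]
      rw [hc1, hget2]
      have hmem : dchar (k+1) ∈ cs.drop (p+1) := hfget ▸ List.getElem_mem hflen
      rw [maxDigB_attain (k+1) _ _ hmem (by omega) (by omega)]
      simp only [hav, ofChars?_dchar (k+1) hd1 hk9, Option.map]
      rw [dv_dchar (k+1) hd1 hk9]
    · rw [if_neg hfind]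
      have hne : dchar (k+1) ∉ cs.drop (p+1) := by
        intro hmem
        have := PySem.Chars.find_nonneg_iff (cs.drop (p+1)) [dchar (k+1)]
        exact hfind (this.2 ((singleton_infix_mem _ _).2 hmem))
      rw [maxDigB_shrink k _ (fun c hc he => hne (eq_dchar_of_toNat c (k+1) (by omega) ▸ hc))]
      exact ih (by omega)

theorem A_outer (cs : List Char) : ∀ k, k ≤ 9 → dcA_outer cs (desc k) = specB k cs := by
  intro k
  induction k with
  | zero => intro _; rw [specB_zero]; rfl
  | succ k ih =>
    intro hk9
    have hd1 : 1 ≤ k + 1 := by omega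
    have hdc := dchar_toNat (k+1) hd1 hk9
    simp only [desc, dcA_outer, slice_pref cs, toChars_digit (k+1) hd1 hk9]
    by_cases hfind : 0 ≤ PySem.Chars.find cs.dropLast [dchar (k+1)]
    · obtain ⟨hpre, hmin⟩ := PySem.Chars.find_spec hfind
      obtain ⟨hplen, hPp⟩ := prefix_drop_get _ _ _ hpre
      have hlenP : cs.dropLast.length = cs.length - 1 := List.length_dropLast
      have hpcs : (PySem.Chars.find cs.dropLast [dchar (k+1)]).toNat < cs.length := by omega
      have hcsp : cs[(PySem.Chars.find cs.dropLast [dchar (k+1)]).toNat]'hpcs = dchar (k+1) := by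
        rw [← List.getElem_dropLast]
        exact hPp
      have hfp : PySem.Chars.find cs.dropLast [dchar (k+1)] =
          (((PySem.Chars.find cs.dropLast [dchar (k+1)]).toNat : Nat) : Int) :=
        (Int.toNat_of_nonneg hfind).symm
      have hgetc : PySem.List.pyGet? cs (((PySem.Chars.find cs.dropLast [dchar (k+1)]).toNat : Nat) : Int) = some (dchar (k+1)) := by
        rw [PySem.List.pyGet?_of_nonneg _ (by omega), Int.toNat_natCast,
          List.getElem?_eq_getElem hpcs, hcsp]
      rw [if_pos hfind, pyRange_desc, hfp,
        A_inner cs _ (dchar (k+1)) ((k+1 : Nat) : Int) hgetc (ofChars?_dchar (k+1) hd1 hk9) 9 (by omega)]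
      have htake : dchar (k+1) ∉ cs.take (PySem.Chars.find cs.dropLast [dchar (k+1)]).toNat := by
        intro hmem
        obtain ⟨i, hi, hieq⟩ := List.mem_iff_getElem.1 hmem
        have hilt : i < (PySem.Chars.find cs.dropLast [dchar (k+1)]).toNat := by
          simp at hi; omega
        have hiP : i < cs.dropLast.length := by omega
        have hieq' : cs.dropLast[i]'hiP = dchar (k+1) := by
          rw [List.getElem_dropLast, ← List.getElem_take]
          exact hieq
        exact hmin i hilt (drop_prefix_of_getElem _ _ _ hiP hieq')
      have hsplit : cs = cs.take (PySem.Chars.find cs.dropLast [dchar (k+1)]).toNat ++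
          dchar (k+1) :: cs.drop ((PySem.Chars.find cs.dropLast [dchar (k+1)]).toNat + 1) := by
        conv_lhs => rw [← List.take_append_drop (PySem.Chars.find cs.dropLast [dchar (k+1)]).toNat cs]
        rw [← List.getElem_cons_drop hpcs, hcsp]
      cases hmd : maxDigB 9 (cs.drop ((PySem.Chars.find cs.dropLast [dchar (k+1)]).toNat + 1)) with
      | some m =>
        simp only [Option.map]
        conv_rhs => rw [hsplit]
        rw [spec_S1 (k+1) hd1 hk9 _ _ m hmd htake]
      | none =>
        simp only [Option.map]
        rw [ih (by omega)]
        conv_rhs => rw [hsplit]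
        rw [spec_S2 (k+1) hd1 hk9 _ _ hmd htake]
        conv_lhs => rw [hsplit]
        simp only [Nat.add_sub_cancel]
    · rw [if_neg hfind]
      have hne : dchar (k+1) ∉ cs.dropLast := by
        intro hmem
        have := PySem.Chars.find_nonneg_iff cs.dropLast [dchar (k+1)]
        exact hfind (this.2 ((singleton_infix_mem _ _).2 hmem))
      have hs3 := spec_S3 (k+1) hd1 hk9 cs hne
      simp only [Nat.add_sub_cancel] at hs3
      rw [ih (by omega), ← hs3]

theorem B_char (cs : List Char) :
    cs.reverse.foldl dcB_step (none, none) = (specB 9 cs, maxDigB 9 cs) := by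
  induction cs with
  | nil => rfl
  | cons c t ih =>
    rw [List.reverse_cons, List.foldl_append, ih]
    simp only [List.foldl_cons, List.foldl_nil]
    unfold dcB_step
    by_cases hc : 49 ≤ c.toNat ∧ c.toNat ≤ 57
    · rw [if_pos ((char_cond c).2 hc)]
      simp only [specB, maxDigB]
      rw [if_pos (⟨hc.1, by omega⟩ : 49 ≤ c.toNat ∧ c.toNat ≤ 48 + 9),
        if_pos (⟨hc.1, by omega⟩ : 49 ≤ c.toNat ∧ c.toNat ≤ 48 + 9)]
      rfl
    · rw [if_neg (fun hcc => hc ((char_cond c).1 hcc))]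
      simp only [specB, maxDigB]
      rw [if_neg (by omega), if_neg (by omega)]

-- ===== VERDICT (by name: the statement is the Claim_ definition above) =====
theorem digit_check_spec : Claim_equal_digit_check := by
  intro s _
  unfold Spec_digit_check digit_check digit_check_alt
  rw [pyRange_desc, A_outer s.toList 9 (by omega), B_char]
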